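-- pv_equiv track=rewrite | github.com/DancingOnAir/LeetcodePythonSolution | hash_table/2062_count_vowel_substrings_of_a_string.py | countVowelSubstrings1
-- ===== SOURCE A (Python) =====
-- from collections import defaultdict
--
-- def countVowelSubstrings1(word: str) -> int:
--     freq = defaultdict(int)
--     res = j = 0
--     for i, c in enumerate(word):
--         if c in 'aeiou':
--             if not i or word[i - 1] not in 'aeiou':
--                 jj = j = i
--                 freq.clear()
--
--             freq[c] += 1
--             while len(freq) == 5 and all(freq.values()):
--                 freq[word[j]] -= 1
--                 j += 1
--             res += j - jj
--
--     return res
-- ===== SOURCE B (Python) =====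
-- def countVowelSubstrings1(word: str) -> int:
--     res = 0
--     n = len(word)
--     for i in range(n):
--         seen = set()
--         for j in range(i, n):
--             c = word[j]
--             if c not in 'aeiou':
--                 break
--             seen.add(c)
--             if len(seen) == 5:
--                 res += 1
--     return res
-- ===== Notes on version B (the rewrite author's own statement) =====
-- stated objective: simpler
-- what changed: Replaces A's amortized two-pointer sliding window with a freq dict by a plain nested scan: for each start index walk forward over vowels keeping a set of vowels seen, counting whenever the set reaches size 5.
import Mathlib
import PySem

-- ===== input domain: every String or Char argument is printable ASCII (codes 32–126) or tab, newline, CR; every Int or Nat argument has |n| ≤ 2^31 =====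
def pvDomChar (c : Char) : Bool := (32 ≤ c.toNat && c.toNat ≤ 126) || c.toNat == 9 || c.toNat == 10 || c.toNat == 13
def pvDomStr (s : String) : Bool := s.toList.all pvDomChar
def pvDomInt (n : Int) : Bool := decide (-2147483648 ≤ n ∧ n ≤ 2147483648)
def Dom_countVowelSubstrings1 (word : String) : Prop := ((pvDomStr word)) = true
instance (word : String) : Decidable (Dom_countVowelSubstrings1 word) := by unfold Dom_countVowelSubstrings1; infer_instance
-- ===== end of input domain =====

-- B replaces A's amortized two-pointer sliding window (freq dict) by a plain nested scan per
-- start index keeping a set of vowels seen (objective: simpler; not faster).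

def pvVowels : List Char := ['a', 'e', 'i', 'o', 'u']

-- `c in 'aeiou'` for a single char is exactly membership in the five vowels
def pvIsV (c : Char) : Bool := pvVowels.contains c

-- ===== PORT A =====
-- the `while len(freq) == 5 and all(freq.values())` loop; fuel-bounded recursion
-- (fuel `wl.length + 1` always suffices: each iteration consumes one window position)
def pvAWhile (wl : List Char) : Nat → PySem.Dict Char Int → Int → PySem.Dict Char Int × Int
  | 0, freq, j => (freq, j)
  | fuel + 1, freq, j =>
    if freq.size == 5 && freq.values.all (fun v => decide (v ≠ 0)) then
      let c := PySem.List.pyGetD wl j ' '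
      pvAWhile wl fuel (freq.insert c (freq.getD c 0 - 1)) (j + 1)
    else (freq, j)

-- one iteration of `for i, c in enumerate(word)`; state = (res, j, jj, freq)
def pvAStep (wl : List Char) (st : Int × Int × Int × PySem.Dict Char Int) (i : Int) (c : Char) :
    Int × Int × Int × PySem.Dict Char Int :=
  let (res, j, jj, freq) := st
  if pvIsV c then
    let (j, jj, freq) :=
      if i == 0 || !(pvIsV (PySem.List.pyGetD wl (i - 1) ' ')) then (i, i, PySem.Dict.empty)
      else (j, jj, freq)
    let freq := freq.insert c (freq.getD c 0 + 1)
    let (freq2, j2) := pvAWhile wl (wl.length + 1) freq j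
    (res + (j2 - jj), j2, jj, freq2)
  else (res, j, jj, freq)

def pvALoop (wl : List Char) : List Char → Int → Int × Int × Int × PySem.Dict Char Int → Int
  | [], _, st => st.1
  | c :: rest, i, st => pvALoop wl rest (i + 1) (pvAStep wl st i c)

def countVowelSubstrings1 (word : String) : Int :=
  pvALoop word.toList word.toList 0 (0, 0, 0, PySem.Dict.empty)

-- ===== PORT B =====
-- inner loop `for j in range(i, n)` with break, over the suffix word[i:]
def pvBInner : Int → PySem.Set Char → List Char → Int
  | res, _, [] => res
  | res, seen, c :: rest =>
    if !(pvIsV c) then res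
    else
      let seen := PySem.Set.add seen c
      let res := if PySem.Set.len seen == 5 then res + 1 else res
      pvBInner res seen rest

def countVowelSubstrings1_alt (word : String) : Int :=
  let wl := word.toList
  (List.range wl.length).foldl (fun res i => pvBInner res PySem.Set.empty (wl.drop i)) 0

-- ===== PRECONDITION & SPEC =====
def Spec_countVowelSubstrings1 (word : String) (out : Int) : Prop := out = countVowelSubstrings1_alt word
instance (word : String) (out : Int) : Decidable (Spec_countVowelSubstrings1 word out) := by unfold Spec_countVowelSubstrings1; infer_instance

-- ===== CLAIM (what is proved, stated in full; the proofs are below) =====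
def Claim_equal_countVowelSubstrings1 : Prop := ∀ (word : String), Dom_countVowelSubstrings1 word → Spec_countVowelSubstrings1 word (countVowelSubstrings1 word)

-- ===== LEMMAS AND PROOFS =====

-- the common specification: count of index pairs (s, e) whose segment is vowel-only and has all five
def pvSeg (wl : List Char) (s e : Nat) : List Char := (wl.drop s).take (e + 1 - s)

def pvAll5 (t : List Char) : Bool := pvVowels.all (fun v => t.contains v)

def pvGood (wl : List Char) (s e : Nat) : Bool := (pvSeg wl s e).all pvIsV && pvAll5 (pvSeg wl s e)

def pvG (wl : List Char) (e : Nat) : Nat := ((List.range (e + 1)).filter (fun s => pvGood wl s e)).length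

def pvF (wl : List Char) (s : Nat) : Nat := ((List.range (wl.length - s)).filter (fun k => pvGood wl s (s + k))).length

-- length of the maximal vowel-only suffix of wl.take m
def pvRun (wl : List Char) : Nat → Nat
  | 0 => 0
  | m + 1 => if pvIsV (wl.getD m ' ') then pvRun wl m + 1 else 0

-- A's loop invariant after processing the first m characters
def pvInv (wl : List Char) (m : Nat) (st : Int × Int × Int × PySem.Dict Char Int) : Prop :=
  st.1 = ((∑ e ∈ Finset.range m, pvG wl e : Nat) : Int) ∧
  (pvRun wl m = 0 ∨
    (st.2.2.1 = ((m - pvRun wl m : Nat) : Int) ∧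
     ∃ jn : Nat, st.2.1 = (jn : Int) ∧ (m - pvRun wl m) ≤ jn ∧ jn ≤ m ∧
       (∀ ℓ, (m - pvRun wl m) ≤ ℓ → ℓ < jn → pvAll5 ((wl.drop ℓ).take (m - ℓ)) = true) ∧
       pvAll5 ((wl.drop jn).take (m - jn)) = false ∧
       (st.2.2.2).keys.Nodup ∧
       (∀ c, (st.2.2.2).getD c 0 = (((wl.drop jn).take (m - jn)).count c : Int)) ∧
       (∀ c, (st.2.2.2).contains c = ((wl.drop (m - pvRun wl m)).take (m - (m - pvRun wl m))).contains c)))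

theorem pvLenFilterSum (p : Nat → Bool) : ∀ m : Nat,
    ((List.range m).filter p).length = ∑ k ∈ Finset.range m, (if p k then 1 else 0) := by
  intro m
  induction m with
  | zero => simp
  | succ m ih =>
    rw [List.range_succ, List.filter_append, List.length_append, ih, Finset.sum_range_succ]
    cases hp : p m <;> simp [hp]

theorem pvAll5_nil : pvAll5 ([] : List Char) = false := by decide

theorem pvSwap' (wl : List Char) :
    (∑ s ∈ Finset.range wl.length, pvF wl s) = ∑ e ∈ Finset.range wl.length, pvG wl e := by
  have hF : ∀ s, pvF wl s = ∑ e ∈ Finset.range wl.length, (if s ≤ e then (if pvGood wl s e then 1 else 0) else 0) := by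
    intro s
    unfold pvF
    rw [pvLenFilterSum]
    rw [show (∑ k ∈ Finset.range (wl.length - s), if pvGood wl s (s + k) then 1 else 0)
        = ∑ e ∈ Finset.Ico s wl.length, (if pvGood wl s e then 1 else 0) from
        (Finset.sum_Ico_eq_sum_range (fun e => if pvGood wl s e then (1 : ℕ) else 0) s wl.length).symm]
    have hcong : ∀ e ∈ Finset.Ico s wl.length, (if pvGood wl s e then (1 : ℕ) else 0)
        = (if s ≤ e then (if pvGood wl s e then 1 else 0) else 0) := by
      intro e he
      simp only [Finset.mem_Ico] at he
      rw [if_pos he.1]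
    rw [Finset.sum_congr rfl hcong]
    apply Finset.sum_subset
    · intro e he
      simp only [Finset.mem_Ico] at he
      simp only [Finset.mem_range]
      omega
    · intro e he hne
      simp only [Finset.mem_range] at he
      simp only [Finset.mem_Ico] at hne
      rw [if_neg (by omega)]
  have hG : ∀ e ∈ Finset.range wl.length, pvG wl e = ∑ s ∈ Finset.range wl.length, (if s ≤ e then (if pvGood wl s e then 1 else 0) else 0) := by
    intro e he
    simp only [Finset.mem_range] at he
    unfold pvG
    rw [pvLenFilterSum]
    have hcong : ∀ s ∈ Finset.range (e + 1), (if pvGood wl s e then (1 : ℕ) else 0)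
        = (if s ≤ e then (if pvGood wl s e then 1 else 0) else 0) := by
      intro s hs
      simp only [Finset.mem_range] at hs
      rw [if_pos (by omega : s ≤ e)]
    rw [Finset.sum_congr rfl hcong]
    apply Finset.sum_subset
    · intro x hx
      simp only [Finset.mem_range] at hx ⊢
      omega
    · intro x hx hxe
      simp only [Finset.mem_range] at hx hxe
      rw [if_neg (by omega)]
  rw [Finset.sum_congr rfl (fun s _ => hF s), Finset.sum_comm,
      Finset.sum_congr rfl hG]

theorem pvLen5 (s : List Char) (hnd : s.Nodup) (hsub : ∀ c ∈ s, c ∈ pvVowels) :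
    (PySem.Set.len s == 5) = pvVowels.all (fun v => s.contains v) := by
  rw [Bool.eq_iff_iff]
  simp only [beq_iff_eq, List.all_eq_true, List.contains_iff_mem, PySem.Set.len]
  constructor
  · intro h5 v hv
    have heq : s.toFinset = pvVowels.toFinset := by
      apply Finset.eq_of_subset_of_card_le
      · intro x hx
        simp only [List.mem_toFinset] at hx ⊢
        exact hsub x hx
      · rw [List.toFinset_card_of_nodup hnd]
        have h5' : s.length = 5 := by exact_mod_cast h5
        rw [h5']
        decide
    have : v ∈ s.toFinset := by
      rw [heq]
      simpa using hv
    simpa using this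
  · intro hall
    have heq : s.toFinset = pvVowels.toFinset := by
      apply subset_antisymm
      · intro x hx
        simp only [List.mem_toFinset] at hx ⊢
        exact hsub x hx
      · intro x hx
        simp only [List.mem_toFinset] at hx ⊢
        exact hall x hx
    have hlen := List.toFinset_card_of_nodup hnd
    rw [heq] at hlen
    have : s.length = 5 := by
      rw [← hlen]
      decide
    exact_mod_cast this

theorem pvBInner_spec (s : List Char) : ∀ (seen : PySem.Set Char) (res : Int),
    seen.Nodup → (∀ c ∈ seen, pvIsV c = true) →
    pvBInner res seen s = res + (((List.range s.length).filter (fun k =>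
      ((s.take (k + 1)).all pvIsV) && pvVowels.all (fun v => seen.contains v || (s.take (k + 1)).contains v))).length : Nat) := by
  induction s with
  | nil =>
    intro seen res _ _
    simp [pvBInner]
  | cons c rest ih =>
    intro seen res hnd hsub
    by_cases hc : pvIsV c = true
    · -- vowel: one step, then the induction hypothesis on rest
      have hnd' : (PySem.Set.add seen c).Nodup := PySem.Set.nodup_add seen c hnd
      have hsub' : ∀ x ∈ PySem.Set.add seen c, pvIsV x = true := by
        intro x hx
        rcases (PySem.Set.mem_add seen c x).1 hx with h | h
        · exact hsub x h
        · rw [h]; exact hc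
      have hstep : pvBInner res seen (c :: rest)
          = pvBInner (if PySem.Set.len (PySem.Set.add seen c) == 5 then res + 1 else res)
              (PySem.Set.add seen c) rest := by
        simp [pvBInner, hc]
      rw [hstep, ih _ _ hnd' hsub']
      rw [pvLenFilterSum, pvLenFilterSum]
      rw [List.length_cons, Finset.sum_range_succ']
      -- the shifted conditions agree
      have hcond : ∀ k : Nat,
          ((((c :: rest).take (k + 1 + 1)).all pvIsV) && pvVowels.all (fun v => seen.contains v || ((c :: rest).take (k + 1 + 1)).contains v))
          = (((rest.take (k + 1)).all pvIsV) && pvVowels.all (fun v => (PySem.Set.add seen c).contains v || (rest.take (k + 1)).contains v)) := by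
        intro k
        rw [List.take_succ_cons, List.all_cons, hc, Bool.true_and]
        have hmm : (pvVowels.all fun v => seen.contains v || (c :: rest.take (k + 1)).contains v)
            = (pvVowels.all fun v => (PySem.Set.add seen c).contains v || (rest.take (k + 1)).contains v) := by
          rw [Bool.eq_iff_iff]
          simp only [List.all_eq_true, Bool.or_eq_true, List.contains_iff_mem, PySem.Set.contains_iff, List.mem_cons,
            PySem.Set.mem_add]
          constructor <;> (intro h v hv; have := h v hv; tauto)
        rw [hmm]
      have hcond0 : ((((c :: rest).take (0 + 1)).all pvIsV) && pvVowels.all (fun v => seen.contains v || ((c :: rest).take (0 + 1)).contains v))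
          = (PySem.Set.len (PySem.Set.add seen c) == 5) := by
        rw [List.take_succ_cons, List.take_zero, List.all_cons, List.all_nil, hc]
        rw [pvLen5 _ hnd' (fun x hx => by
          have := hsub' x hx
          simpa [pvIsV, List.contains_iff_mem] using this)]
        simp only [Bool.and_true, Bool.true_and]
        rw [Bool.eq_iff_iff]
        simp only [List.all_eq_true, Bool.or_eq_true, List.contains_iff_mem, PySem.Set.contains_iff, List.mem_cons,
          List.not_mem_nil, PySem.Set.mem_add, or_false]
      have hsum : ∀ kk : Nat, (∑ k ∈ Finset.range kk, (if (((rest.take (k + 1)).all pvIsV) && pvVowels.all (fun v => (PySem.Set.add seen c).contains v || (rest.take (k + 1)).contains v)) then (1:Nat) else 0))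
          = ∑ k ∈ Finset.range kk, (if ((((c :: rest).take (k + 1 + 1)).all pvIsV) && pvVowels.all (fun v => seen.contains v || ((c :: rest).take (k + 1 + 1)).contains v)) then (1:Nat) else 0) := by
        intro kk
        apply Finset.sum_congr rfl
        intro k _
        rw [hcond k]
      rw [hsum rest.length, hcond0]
      by_cases h5 : (PySem.Set.len (PySem.Set.add seen c) == 5) = true
      · simp only [h5, if_pos]
        push_cast
        ring
      · rw [Bool.not_eq_true] at h5
        simp only [h5]
        push_cast
        ring
    · -- consonant: the port stops; every candidate prefix fails the all-vowel test
      rw [Bool.not_eq_true] at hc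
      simp [pvBInner, hc]

theorem pvFoldAdd (g : Nat → Int) : ∀ (n : Nat) (res : Int),
    (List.range n).foldl (fun r i => r + g i) res = res + ∑ i ∈ Finset.range n, g i := by
  intro n
  induction n with
  | zero => intro res; simp
  | succ n ih =>
    intro res
    rw [List.range_succ, List.foldl_append, ih, Finset.sum_range_succ]
    simp [add_assoc]

theorem pvB_sum (word : String) :
    countVowelSubstrings1_alt word = ((∑ s ∈ Finset.range word.toList.length, pvF word.toList s : Nat) : Int) := by
  have hdef : countVowelSubstrings1_alt word
      = (List.range word.toList.length).foldl (fun res i => pvBInner res PySem.Set.empty (word.toList.drop i)) 0 := rfl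
  rw [hdef]
  have hf : (fun (res : Int) (i : Nat) => pvBInner res PySem.Set.empty (word.toList.drop i))
      = fun (res : Int) (i : Nat) => res + ((pvF word.toList i : Nat) : Int) := by
    funext res i
    rw [pvBInner_spec _ _ _ (by simp [PySem.Set.empty]) (by simp [PySem.Set.empty])]
    congr 1
    unfold pvF
    congr 1
    rw [List.length_drop]
    congr 1
    apply List.filter_congr
    intro k _
    unfold pvGood pvSeg pvAll5
    have h1 : i + k + 1 - i = k + 1 := by omega
    rw [h1]
    simp [PySem.Set.empty]
  rw [hf, pvFoldAdd, zero_add, Nat.cast_sum]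
theorem pvRun_le (wl : List Char) : ∀ m : Nat, pvRun wl m ≤ m := by
  intro m
  induction m with
  | zero => simp [pvRun]
  | succ m ih =>
    rw [pvRun]
    split <;> omega

theorem pvRun_vowels (wl : List Char) : ∀ m k : Nat, m - pvRun wl m ≤ k → k < m →
    pvIsV (wl.getD k ' ') = true := by
  intro m
  induction m with
  | zero => intro k _ h; omega
  | succ m ih =>
    intro k h1 h2
    rw [pvRun] at h1
    by_cases hv : pvIsV (wl.getD m ' ') = true
    · rw [if_pos hv] at h1
      by_cases hk : k = m
      · rw [hk]; exact hv
      · exact ih k (by have := pvRun_le wl m; omega) (by omega)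
    · rw [Bool.not_eq_true] at hv
      rw [hv] at h1
      simp at h1
      omega

theorem pvRun_max (wl : List Char) : ∀ m : Nat, 0 < m - pvRun wl m →
    pvIsV (wl.getD (m - pvRun wl m - 1) ' ') = false := by
  intro m
  induction m with
  | zero => intro h; omega
  | succ m ih =>
    intro h
    rw [pvRun] at h ⊢
    by_cases hv : pvIsV (wl.getD m ' ') = true
    · rw [if_pos hv] at h ⊢
      have hle := pvRun_le wl m
      have : m + 1 - (pvRun wl m + 1) = m - pvRun wl m := by omega
      rw [this] at h ⊢
      exact ih h
    · rw [Bool.not_eq_true] at hv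
      rw [hv]
      simp only [Bool.false_eq_true, if_false]
      have : m + 1 - 0 - 1 = m := by omega
      rw [this]
      exact hv

theorem pvSegElem (wl : List Char) (b t : Nat) (c : Char)
    (hc : c ∈ (wl.drop b).take (t - b)) : ∃ k, b ≤ k ∧ k < t ∧ k < wl.length ∧ wl.getD k ' ' = c := by
  rw [List.mem_iff_getElem] at hc
  obtain ⟨i, hi, hei⟩ := hc
  simp only [List.length_take, List.length_drop, lt_min_iff] at hi
  refine ⟨b + i, by omega, by omega, by omega, ?_⟩
  rw [List.getD_eq_getElem wl ' ' (by omega)]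
  rw [← hei, List.getElem_take, List.getElem_drop]

theorem pvSegMem (wl : List Char) (b t k : Nat) (hk1 : b ≤ k) (hk2 : k < t)
    (hkn : k < wl.length) : wl.getD k ' ' ∈ (wl.drop b).take (t - b) := by
  rw [List.mem_iff_getElem]
  refine ⟨k - b, ?_, ?_⟩
  · simp only [List.length_take, List.length_drop, lt_min_iff]
    omega
  · rw [List.getElem_take, List.getElem_drop, List.getD_eq_getElem wl ' ' hkn]
    congr 1
    omega

theorem pvWindow_drop (wl : List Char) (t b j : Nat) (hbj : b ≤ j) :
    (wl.drop j).take (t - j) = ((wl.drop b).take (t - b)).drop (j - b) := by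
  rw [List.drop_take, List.drop_drop]
  have h1 : b + (j - b) = j := by omega
  have h2 : t - b - (j - b) = t - j := by omega
  rw [h1, h2]

theorem pvTake_ext (wl : List Char) (j m : Nat) (hj : j ≤ m) (hm : m < wl.length) :
    (wl.drop j).take (m + 1 - j) = (wl.drop j).take (m - j) ++ [wl.getD m ' '] := by
  have h1 : m + 1 - j = (m - j) + 1 := by omega
  rw [h1, List.take_add_one]
  congr 1
  rw [List.getElem?_drop]
  have h2 : j + (m - j) = m := by omega
  rw [h2, List.getElem?_eq_getElem hm]
  rw [List.getD_eq_getElem wl ' ' hm]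
  rfl

theorem pvAll5_append (t : List Char) (u : List Char) (h : pvAll5 t = true) :
    pvAll5 (t ++ u) = true := by
  unfold pvAll5 at h ⊢
  simp only [List.all_eq_true, List.contains_iff_mem, List.mem_append] at h ⊢
  intro v hv
  exact Or.inl (h v hv)

theorem pvAll5_sub (t u : List Char) (hsub : ∀ c ∈ t, c ∈ u) (h : pvAll5 t = true) :
    pvAll5 u = true := by
  unfold pvAll5 at h ⊢
  simp only [List.all_eq_true, List.contains_iff_mem] at h ⊢
  intro v hv
  exact hsub v (h v hv)

theorem pvG_zero (wl : List Char) (m : Nat) (hm : m < wl.length)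
    (hv : pvIsV (wl.getD m ' ') = false) : pvG wl m = 0 := by
  unfold pvG
  rw [List.length_eq_zero_iff]
  rw [List.filter_eq_nil_iff]
  intro s hs
  simp only [List.mem_range] at hs
  unfold pvGood pvSeg
  have hmem : wl.getD m ' ' ∈ (wl.drop s).take (m + 1 - s) := pvSegMem wl s (m + 1) m (by omega) (by omega) hm
  have : ((wl.drop s).take (m + 1 - s)).all pvIsV = false := by
    rw [Bool.eq_false_iff]
    intro hall
    rw [List.all_eq_true] at hall
    have := hall _ hmem
    rw [hv] at this
    exact absurd this (by simp)
  simp [this]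

theorem pvCond (freq : PySem.Dict Char Int) (w Bs : List Char)
    (hnd : freq.keys.Nodup)
    (hget : ∀ c, freq.getD c 0 = (w.count c : Int))
    (hcont : ∀ c, freq.contains c = Bs.contains c)
    (hsubW : ∀ c ∈ w, c ∈ Bs)
    (hsubB : ∀ c ∈ Bs, c ∈ pvVowels) :
    (freq.size == 5 && freq.values.all (fun v => decide (v ≠ 0))) = pvAll5 w := by
  have hkeysB : ∀ c, c ∈ freq.keys ↔ c ∈ Bs := by
    intro c
    rw [← PySem.Dict.contains_iff_mem_keys, hcont c, List.contains_iff_mem]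
  have hsz : freq.size = freq.keys.length := by
    simp [PySem.Dict.size, PySem.Dict.keys]
  have hkv : ∀ c ∈ freq.keys, c ∈ pvVowels := fun c hc => hsubB c ((hkeysB c).1 hc)
  rw [PySem.Dict.values_eq_map_keys freq hnd 0, List.all_map]
  rw [Bool.eq_iff_iff]
  simp only [Bool.and_eq_true, beq_iff_eq, List.all_eq_true, Function.comp,
    decide_eq_true_eq, hsz]
  unfold pvAll5
  simp only [List.all_eq_true, List.contains_iff_mem]
  constructor
  · rintro ⟨h5, hvals⟩ v hv
    have heq : freq.keys.toFinset = pvVowels.toFinset := by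
      apply Finset.eq_of_subset_of_card_le
      · intro x hx
        simp only [List.mem_toFinset] at hx ⊢
        exact hkv x hx
      · rw [List.toFinset_card_of_nodup hnd, h5]
        decide
    have hvk : v ∈ freq.keys := by
      have : v ∈ freq.keys.toFinset := by
        rw [heq]
        simpa using hv
      simpa using this
    have hne := hvals v hvk
    rw [hget v] at hne
    have hcnt : w.count v ≠ 0 := by exact_mod_cast hne
    exact List.count_pos_iff.1 (Nat.pos_of_ne_zero hcnt)
  · intro hall
    have hvk : ∀ v ∈ pvVowels, v ∈ freq.keys := by
      intro v hv
      exact (hkeysB v).2 (hsubW v (hall v hv))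
    have heq : freq.keys.toFinset = pvVowels.toFinset := by
      apply subset_antisymm
      · intro x hx
        simp only [List.mem_toFinset] at hx ⊢
        exact hkv x hx
      · intro x hx
        simp only [List.mem_toFinset] at hx ⊢
        exact hvk x hx
    constructor
    · have hlen := List.toFinset_card_of_nodup hnd
      rw [heq] at hlen
      have hc5 : pvVowels.toFinset.card = 5 := by decide
      rw [hc5] at hlen
      exact hlen.symm
    · intro c hc
      rw [hget c]
      have hcw : c ∈ w := hall c (hkv c hc)
      have hpos := List.count_pos_iff.2 hcw
      intro h0
      have : w.count c = 0 := by exact_mod_cast h0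
      omega

theorem pvAWhile_spec (wl : List Char) (t b : Nat) (ht : t ≤ wl.length)
    (hBv : ∀ c ∈ (wl.drop b).take (t - b), c ∈ pvVowels) :
    ∀ (fuel : Nat) (j : Nat) (freq : PySem.Dict Char Int),
    t - j < fuel → b ≤ j → j ≤ t →
    freq.keys.Nodup →
    (∀ c, freq.getD c 0 = (((wl.drop j).take (t - j)).count c : Int)) →
    (∀ c, freq.contains c = ((wl.drop b).take (t - b)).contains c) →
    ∃ jn : Nat, ∃ freq' : PySem.Dict Char Int,
      pvAWhile wl fuel freq (j : Int) = (freq', (jn : Int)) ∧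
      j ≤ jn ∧ jn ≤ t ∧
      (∀ ℓ, j ≤ ℓ → ℓ < jn → pvAll5 ((wl.drop ℓ).take (t - ℓ)) = true) ∧
      pvAll5 ((wl.drop jn).take (t - jn)) = false ∧
      freq'.keys.Nodup ∧
      (∀ c, freq'.getD c 0 = (((wl.drop jn).take (t - jn)).count c : Int)) ∧
      (∀ c, freq'.contains c = ((wl.drop b).take (t - b)).contains c) := by
  intro fuel
  induction fuel with
  | zero => intro j freq hfuel; omega
  | succ fuel ih =>
    intro j freq hfuel hbj hjt hnd hget hcont
    have hsubW : ∀ c ∈ (wl.drop j).take (t - j), c ∈ (wl.drop b).take (t - b) := by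
      intro c hc
      rw [pvWindow_drop wl t b j hbj] at hc
      exact List.mem_of_mem_drop hc
    have hcnd := pvCond freq ((wl.drop j).take (t - j)) ((wl.drop b).take (t - b))
      hnd hget hcont hsubW hBv
    rw [pvAWhile]
    rw [hcnd]
    by_cases h5 : pvAll5 ((wl.drop j).take (t - j)) = true
    · rw [if_pos h5]
      -- the window is nonempty, so j < t
      have hjlt : j < t := by
        by_contra hge
        have hjt' : j = t := by omega
        rw [hjt'] at h5
        simp only [Nat.sub_self, List.take_zero] at h5
        rw [pvAll5_nil] at h5
        exact absurd h5 (by simp)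
      have hjn : j < wl.length := by omega
      have hcchar : PySem.List.pyGetD wl (j : Int) ' ' = wl.getD j ' ' :=
        PySem.List.pyGetD_natCast wl j ' '
      rw [hcchar]
      set c := wl.getD j ' ' with hcdef
      have hcons : (wl.drop j).take (t - j) = c :: (wl.drop (j + 1)).take (t - (j + 1)) := by
        rw [List.drop_eq_getElem_cons hjn]
        have h1 : t - j = (t - (j + 1)) + 1 := by omega
        rw [h1, List.take_succ_cons, hcdef, List.getD_eq_getElem wl ' ' hjn]
      have hcmem : c ∈ (wl.drop j).take (t - j) := by
        rw [hcons]
        exact List.mem_cons_self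
      have hget' : ∀ c', (freq.insert c (freq.getD c 0 - 1)).getD c' 0
          = (((wl.drop (j + 1)).take (t - (j + 1))).count c' : Int) := by
        intro c'
        rw [PySem.Dict.getD_insert]
        by_cases hcc : c' = c
        · rw [if_pos hcc, hget c, hcons, hcc, List.count_cons_self]
          push_cast
          ring
        · rw [if_neg hcc, hget c', hcons, List.count_cons_of_ne (Ne.symm hcc)]
      have hcont' : ∀ c', (freq.insert c (freq.getD c 0 - 1)).contains c'
          = ((wl.drop b).take (t - b)).contains c' := by
        intro c'
        rw [PySem.Dict.contains_insert]
        by_cases hcc : c' = c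
        · rw [hcc]
          simp only [BEq.rfl, Bool.true_or]
          have : c ∈ (wl.drop b).take (t - b) := hsubW c hcmem
          exact (List.contains_iff_mem.mpr this).symm
        · have : (c' == c) = false := by
            simp [hcc]
          rw [this, Bool.false_or, hcont c']
      obtain ⟨jn, freq', heq, hj1, hj2, hallw, hnot, hnd2, hget2, hcont2⟩ :=
        ih (j + 1) (freq.insert c (freq.getD c 0 - 1)) (by omega) (by omega) (by omega)
          (PySem.Dict.nodup_keys_insert _ _ _ hnd) hget' hcont'
      refine ⟨jn, freq', ?_, by omega, hj2, ?_, hnot, hnd2, hget2, hcont2⟩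
      · rw [show ((j : Int) + 1) = ((j + 1 : Nat) : Int) by push_cast; ring]
        exact heq
      · intro ℓ hℓ1 hℓ2
        by_cases hℓj : ℓ = j
        · rw [hℓj]
          exact h5
        · exact hallw ℓ (by omega) hℓ2
    · rw [if_neg h5]
      rw [Bool.not_eq_true] at h5
      refine ⟨j, freq, rfl, le_refl j, hjt, ?_, h5, hnd, hget, hcont⟩
      intro ℓ h1 h2
      omega

theorem pvBlock_vowels (wl : List Char) (t : Nat) :
    ∀ c ∈ (wl.drop (t - pvRun wl t)).take (t - (t - pvRun wl t)), c ∈ pvVowels := by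
  intro c hc
  obtain ⟨k, hk1, hk2, _, hk4⟩ := pvSegElem wl _ t c hc
  have hvk := pvRun_vowels wl t k hk1 hk2
  rw [hk4] at hvk
  unfold pvIsV at hvk
  rwa [List.contains_iff_mem] at hvk

theorem pvCount (wl : List Char) (m b j' : Nat) (hm : m < wl.length)
    (hb : b = m + 1 - pvRun wl (m + 1))
    (hbj : b ≤ j') (hjt : j' ≤ m + 1)
    (hall : ∀ ℓ, b ≤ ℓ → ℓ < j' → pvAll5 ((wl.drop ℓ).take (m + 1 - ℓ)) = true)
    (hnot : pvAll5 ((wl.drop j').take (m + 1 - j')) = false) :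
    pvG wl m = j' - b := by
  have hBv : ∀ c ∈ (wl.drop b).take (m + 1 - b), c ∈ pvVowels := by
    rw [hb]
    intro c hc
    apply pvBlock_vowels wl (m + 1) c
    exact hc
  unfold pvG
  have hpred : ∀ s ∈ List.range (m + 1), pvGood wl s m = decide (b ≤ s ∧ s < j') := by
    intro s hs
    simp only [List.mem_range] at hs
    by_cases hbs : b ≤ s ∧ s < j'
    · rw [decide_eq_true hbs]
      unfold pvGood pvSeg
      rw [Bool.and_eq_true]
      constructor
      · rw [List.all_eq_true]
        intro c hc
        rw [pvWindow_drop wl (m + 1) b s hbs.1] at hc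
        have := hBv c (List.mem_of_mem_drop hc)
        unfold pvIsV
        rwa [List.contains_iff_mem]
      · exact hall s hbs.1 hbs.2
    · rw [decide_eq_false hbs]
      rw [Bool.eq_false_iff]
      intro hgood
      unfold pvGood pvSeg at hgood
      rw [Bool.and_eq_true] at hgood
      by_cases hsb : s < b
      · -- the char before the block is a consonant and lies in the segment
        have hbpos : 0 < b := by omega
        have hmem : wl.getD (b - 1) ' ' ∈ (wl.drop s).take (m + 1 - s) :=
          pvSegMem wl s (m + 1) (b - 1) (by omega) (by omega) (by omega)
        have hcons : pvIsV (wl.getD (b - 1) ' ') = false := by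
          have := pvRun_max wl (m + 1) (by omega)
          rwa [← hb] at this
        rw [List.all_eq_true] at hgood
        have := hgood.1 _ hmem
        rw [hcons] at this
        exact absurd this (by simp)
      · -- s ≥ j' : all5 would transfer down to j'
        have hsj : j' ≤ s := by omega
        have hsub : ∀ c ∈ (wl.drop s).take (m + 1 - s), c ∈ (wl.drop j').take (m + 1 - j') := by
          intro c hc
          rw [pvWindow_drop wl (m + 1) j' s hsj] at hc
          exact List.mem_of_mem_drop hc
        have := pvAll5_sub _ _ hsub hgood.2
        rw [hnot] at this
        exact absurd this (by simp)
  rw [List.filter_congr hpred, pvLenFilterSum]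
  have h2 : ∀ s ∈ Finset.range (m + 1), (if decide (b ≤ s ∧ s < j') then (1 : Nat) else 0)
      = if b ≤ s ∧ s < j' then 1 else 0 := by
    intro s _
    simp
  rw [Finset.sum_congr rfl h2, ← Finset.card_filter]
  have h3 : (Finset.range (m + 1)).filter (fun s => b ≤ s ∧ s < j') = Finset.Ico b j' := by
    ext s
    simp only [Finset.mem_filter, Finset.mem_range, Finset.mem_Ico]
    omega
  rw [h3, Nat.card_Ico]

theorem pvStep (wl : List Char) (m : Nat) (st : Int × Int × Int × PySem.Dict Char Int)
    (hm : m < wl.length) (hinv : pvInv wl m st) :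
    pvInv wl (m + 1) (pvAStep wl st (m : Int) (wl.getD m ' ')) := by
  obtain ⟨res, j, jj, freq⟩ := st
  obtain ⟨hres, hcase⟩ := hinv
  simp only at hres
  by_cases hv : pvIsV (wl.getD m ' ') = true
  case neg =>
    rw [Bool.not_eq_true] at hv
    have hstep : pvAStep wl (res, j, jj, freq) (m : Int) (wl.getD m ' ') = (res, j, jj, freq) := by
      simp only [pvAStep]
      rw [hv]
      simp
    rw [hstep]
    constructor
    · simp only
      rw [Finset.sum_range_succ, pvG_zero wl m hm hv, hres]
      simp
    · left
      rw [pvRun, hv]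
      simp
  case pos =>
    have hrun' : pvRun wl (m + 1) = pvRun wl m + 1 := by
      rw [pvRun, hv]
      simp
    have hrle := pvRun_le wl m
    have hrcond : (((m : Int) == 0) || !(pvIsV (PySem.List.pyGetD wl ((m : Int) - 1) ' ')))
        = decide (pvRun wl m = 0) := by
      cases m with
      | zero => simp [pvRun]
      | succ m' =>
        have h0 : (((m' + 1 : Nat) : Int) == 0) = false := by
          rw [beq_eq_false_iff_ne]
          push_cast
          omega
        rw [show ((((m' : Nat) + 1 : Nat) : Int)) = ((m' + 1 : Nat) : Int) from rfl] at *
        rw [h0, Bool.false_or]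
        have h1 : ((m' + 1 : Nat) : Int) - 1 = ((m' : Nat) : Int) := by push_cast; ring
        rw [h1, PySem.List.pyGetD_natCast]
        rw [pvRun]
        by_cases hv' : pvIsV (wl.getD m' ' ') = true
        · rw [hv']
          simp
        · rw [Bool.not_eq_true] at hv'
          rw [hv']
          simp
    set c := wl.getD m ' ' with hcdef
    have hseg1 : (wl.drop m).take (m + 1 - m) = [c] := by
      rw [List.drop_eq_getElem_cons hm]
      have h1 : m + 1 - m = 1 := by omega
      rw [h1]
      rw [show (1 : Nat) = 0 + 1 from rfl, List.take_succ_cons, List.take_zero]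
      rw [hcdef, List.getD_eq_getElem wl ' ' hm]
    by_cases hrun : pvRun wl m = 0
    · -- reset: a new block starts at m
      have hb' : m + 1 - pvRun wl (m + 1) = m := by omega
      have hBv : ∀ ch ∈ (wl.drop m).take (m + 1 - m), ch ∈ pvVowels := by
        have := pvBlock_vowels wl (m + 1)
        rw [hb'] at this
        exact this
      have hget1 : ∀ c', (PySem.Dict.empty.insert c (PySem.Dict.empty.getD c 0 + 1)).getD c' 0
          = (((wl.drop m).take (m + 1 - m)).count c' : Int) := by
        intro c'
        rw [PySem.Dict.getD_insert, hseg1]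
        by_cases hcc : c' = c
        · rw [if_pos hcc, PySem.Dict.getD_empty, hcc, List.count_singleton]
          simp
        · rw [if_neg hcc, PySem.Dict.getD_empty]
          have hcc' : ¬ c = c' := fun h => hcc h.symm
          simp [hcc']
      have hcont1 : ∀ c', (PySem.Dict.empty.insert c (PySem.Dict.empty.getD c 0 + 1)).contains c'
          = ((wl.drop m).take (m + 1 - m)).contains c' := by
        intro c'
        rw [PySem.Dict.contains_insert, PySem.Dict.contains_empty, hseg1, Bool.or_false]
        rw [Bool.eq_iff_iff]
        simp only [beq_iff_eq, List.contains_iff_mem, List.mem_singleton]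
      obtain ⟨jn, freq', heq, hj1, hj2, hallw, hnotw, hnd', hget', hcont'⟩ :=
        pvAWhile_spec wl (m + 1) m (by omega) hBv (wl.length + 1) m
          (PySem.Dict.empty.insert c (PySem.Dict.empty.getD c 0 + 1))
          (by omega) (le_refl m) (by omega)
          (PySem.Dict.nodup_keys_insert _ _ _ PySem.Dict.nodup_keys_empty) hget1 hcont1
      have hstep : pvAStep wl (res, j, jj, freq) (m : Int) c
          = (res + ((jn : Int) - (m : Int)), (jn : Int), (m : Int), freq') := by
        simp only [pvAStep]
        rw [if_pos hv]
        rw [if_pos (show (((m : Int) == 0) || !(pvIsV (PySem.List.pyGetD wl ((m : Int) - 1) ' '))) = true by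
          rw [hrcond]; exact decide_eq_true hrun)]
        rw [heq]
      rw [hstep]
      have hGm : pvG wl m = jn - m := by
        apply pvCount wl m m jn hm (by omega) hj1 hj2
        · intro ℓ h1 h2
          exact hallw ℓ h1 h2
        · exact hnotw
      constructor
      · simp only
        rw [Finset.sum_range_succ, hGm, hres]
        push_cast
        omega
      · right
        constructor
        · simp only
          rw [hb']
        · refine ⟨jn, rfl, ?_, ?_, ?_, ?_, hnd', ?_, ?_⟩
          · rw [hb']; exact hj1
          · omega
          · intro ℓ h1 h2
            rw [hb'] at h1
            exact hallw ℓ h1 h2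
          · exact hnotw
          · exact hget'
          · rw [hb']
            exact hcont'
    · -- continue: the block extends
      rcases hcase with hcase | hcase
      · exact absurd hcase hrun
      obtain ⟨hjj, jn₀, hj, hbj₀, hjm₀, hall₀, hnot₀, hnd₀, hget₀, hcont₀⟩ := hcase
      simp only at hjj hj
      set b := m - pvRun wl m with hbdef
      have hrpos : 0 < pvRun wl m := Nat.pos_of_ne_zero hrun
      have hb' : m + 1 - pvRun wl (m + 1) = b := by
        rw [hrun']
        omega
      have hext : ∀ ℓ, ℓ ≤ m → (wl.drop ℓ).take (m + 1 - ℓ) = (wl.drop ℓ).take (m - ℓ) ++ [c] := by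
        intro ℓ hℓ
        rw [pvTake_ext wl ℓ m hℓ hm, hcdef]
      have hget1 : ∀ c', (freq.insert c (freq.getD c 0 + 1)).getD c' 0
          = (((wl.drop jn₀).take (m + 1 - jn₀)).count c' : Int) := by
        intro c'
        rw [PySem.Dict.getD_insert, hext jn₀ hjm₀, List.count_append, List.count_singleton]
        by_cases hcc : c' = c
        · rw [if_pos hcc, hget₀ c, hcc]
          simp
        · rw [if_neg hcc, hget₀ c']
          have hcc' : ¬ c = c' := fun h => hcc h.symm
          simp [hcc']
      have hcont1 : ∀ c', (freq.insert c (freq.getD c 0 + 1)).contains c'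
          = ((wl.drop b).take (m + 1 - b)).contains c' := by
        intro c'
        rw [PySem.Dict.contains_insert, hcont₀ c', hext b (by omega)]
        rw [Bool.eq_iff_iff]
        simp only [Bool.or_eq_true, beq_iff_eq, List.contains_iff_mem, List.mem_append,
          List.mem_singleton]
        tauto
      have hBv : ∀ ch ∈ (wl.drop b).take (m + 1 - b), ch ∈ pvVowels := by
        have := pvBlock_vowels wl (m + 1)
        rw [hb'] at this
        exact this
      obtain ⟨jn, freq', heq, hj1, hj2, hallw, hnotw, hnd', hget', hcont'⟩ :=
        pvAWhile_spec wl (m + 1) b (by omega) hBv (wl.length + 1) jn₀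
          (freq.insert c (freq.getD c 0 + 1))
          (by omega) (by omega) (by omega)
          (PySem.Dict.nodup_keys_insert _ _ _ hnd₀) hget1 hcont1
      have hstep : pvAStep wl (res, j, jj, freq) (m : Int) c
          = (res + ((jn : Int) - jj), (jn : Int), jj, freq') := by
        simp only [pvAStep]
        rw [if_pos hv]
        rw [if_neg (show ¬ (((m : Int) == 0) || !(pvIsV (PySem.List.pyGetD wl ((m : Int) - 1) ' '))) = true by
          rw [hrcond]; simp [hrun])]
        rw [hj, heq]
      rw [hstep]
      have hGm : pvG wl m = jn - b := by
        apply pvCount wl m b jn hm (by omega) (by omega) hj2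
        · intro ℓ h1 h2
          by_cases hℓ : ℓ < jn₀
          · rw [hext ℓ (by omega)]
            exact pvAll5_append _ _ (hall₀ ℓ h1 hℓ)
          · exact hallw ℓ (by omega) h2
        · exact hnotw
      constructor
      · simp only
        rw [Finset.sum_range_succ, hGm, hres, hjj]
        have hble : b ≤ jn := by omega
        push_cast
        omega
      · right
        constructor
        · simp only
          rw [hjj, hb']
        · refine ⟨jn, rfl, ?_, ?_, ?_, ?_, hnd', ?_, ?_⟩
          · rw [hb']; omega
          · omega
          · intro ℓ h1 h2
            rw [hb'] at h1
            by_cases hℓ : ℓ < jn₀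
            · rw [hext ℓ (by omega)]
              exact pvAll5_append _ _ (hall₀ ℓ h1 hℓ)
            · exact hallw ℓ (by omega) h2
          · exact hnotw
          · exact hget'
          · rw [hb']
            exact hcont'

theorem pvLoop (wl : List Char) (rest : List Char) :
    ∀ (m : Nat) (st : Int × Int × Int × PySem.Dict Char Int),
    rest = wl.drop m → m ≤ wl.length → pvInv wl m st →
    pvALoop wl rest (m : Int) st = ((∑ e ∈ Finset.range wl.length, pvG wl e : Nat) : Int) := by
  induction rest with
  | nil =>
    intro m st hdrop hle hinv
    have hm : wl.length ≤ m := List.drop_eq_nil_iff.mp hdrop.symm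
    have hmeq : m = wl.length := by omega
    rw [show pvALoop wl [] (m : Int) st = st.1 from rfl, hinv.1, hmeq]
  | cons c rest' ih =>
    intro m st hdrop hle hinv
    have hm : m < wl.length := by
      by_contra h
      rw [List.drop_eq_nil_iff.mpr (by omega)] at hdrop
      exact absurd hdrop (by simp)
    have hcmb := hdrop.trans (List.drop_eq_getElem_cons hm)
    obtain ⟨hc, hrest⟩ := List.cons_eq_cons.mp hcmb
    have hstep : pvALoop wl (c :: rest') (m : Int) st
        = pvALoop wl rest' ((m : Int) + 1) (pvAStep wl st (m : Int) c) := rfl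
    rw [hstep, hc, show wl[m] = wl.getD m ' ' from (List.getD_eq_getElem wl ' ' hm).symm]
    rw [show ((m : Int) + 1) = ((m + 1 : Nat) : Int) by push_cast; ring]
    exact ih (m + 1) _ hrest (by omega) (pvStep wl m st hm hinv)

theorem pvA_sum (word : String) :
    countVowelSubstrings1 word = ((∑ e ∈ Finset.range word.toList.length, pvG word.toList e : Nat) : Int) := by
  have h0 : countVowelSubstrings1 word
      = pvALoop word.toList word.toList (((0 : Nat) : Int)) (0, 0, 0, PySem.Dict.empty) := by
    unfold countVowelSubstrings1
    norm_num
  rw [h0]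
  apply pvLoop word.toList word.toList 0 _ (by simp) (Nat.zero_le _)
  constructor
  · simp
  · left
    rfl

-- ===== VERDICT (by name: the statement is the Claim_ definition above) =====
theorem countVowelSubstrings1_spec : Claim_equal_countVowelSubstrings1 := by
  intro word _
  unfold Spec_countVowelSubstrings1
  rw [pvA_sum word, pvB_sum word, ← pvSwap' word.toList]
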